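-- pv_equiv track=rewrite | github.com/timleung22/python-practice | Parenthesis.py | replaceAsterisk
-- ===== SOURCE A (Python) =====
-- def replaceAsterisk(source):
--     replaced = set()
--     idx = source.find('*')
--     if idx != -1:
--         prefix = source[0:idx]
--         replaced = replaced.union(replaceAsterisk(prefix+source[idx+1:]))
--         replaced = replaced.union(replaceAsterisk(prefix+"("+source[idx+1:]))
--         replaced = replaced.union(replaceAsterisk(prefix+")"+source[idx+1:]))
--     else:
--         replaced.add(source)
--
--     return replaced
-- ===== SOURCE B (Python) =====
-- def replaceAsterisk(source):
--     outs = ['']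
--     buf = []
--     for ch in source:
--         if ch == '*':
--             seg = ''.join(buf)
--             buf = []
--             outs = [p + seg + c for p in outs for c in ("", "(", ")")]
--         else:
--             buf.append(ch)
--     tail = ''.join(buf)
--     result = set()
--     for p in outs:
--         result.add(p + tail)
--     return result
-- ===== Notes on version B (the rewrite author's own statement) =====
-- stated objective: alternative
-- what changed: A recursively re-scans the string (find + slicing) and unions three recursively built sets per asterisk; B makes a single left-to-right pass that buffers plain characters and, at each asterisk, extends every partial result three ways, deduplicating once at the end.
import Mathlib
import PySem

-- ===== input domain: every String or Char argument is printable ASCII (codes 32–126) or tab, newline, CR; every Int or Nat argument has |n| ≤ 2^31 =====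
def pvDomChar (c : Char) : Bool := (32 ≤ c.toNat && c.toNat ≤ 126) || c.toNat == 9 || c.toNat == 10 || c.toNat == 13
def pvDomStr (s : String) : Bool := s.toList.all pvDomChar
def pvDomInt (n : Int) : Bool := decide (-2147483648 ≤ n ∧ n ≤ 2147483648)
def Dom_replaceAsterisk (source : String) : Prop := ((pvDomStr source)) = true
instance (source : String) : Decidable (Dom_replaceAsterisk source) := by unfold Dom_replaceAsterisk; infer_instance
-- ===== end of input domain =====

-- B replaces A's find/slice recursion (three recursive calls with set unions at every level) by a single
-- left-to-right pass that extends every partial result at each character, deduplicating once at the end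
-- (objective: alternative decomposition; the return value is a Python set, ported as the distinct-element list).

-- ===== PORT A =====
-- A works on Python strings; the port works on `List Char` (PySem's string model) and rebuilds `String`s
-- at the end with `String.ofList` — `source.find('*')` is `PySem.Chars.find s ['*']`, the slices `source[0:idx]`
-- and `source[idx+1:]` are `PySem.List.slice`, `set.union` is `PySem.Set.union`, `set.add` is `PySem.Set.add`.

-- facts about the first '*' (cited by the port's termination proof)
theorem find_star_decomp (s : List Char) (h : ¬ PySem.Chars.find s ['*'] = -1) :
    ∃ n : Nat, PySem.Chars.find s ['*'] = (n : Int) ∧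
      PySem.List.slice s (some 0) (some (PySem.Chars.find s ['*'])) = s.take n ∧
      PySem.List.slice s (some (PySem.Chars.find s ['*'] + 1)) none = s.drop (n + 1) ∧
      s = s.take n ++ '*' :: s.drop (n + 1) ∧ '*' ∉ s.take n := by
  have h0 : (0 : Int) ≤ PySem.Chars.find s ['*'] := by
    have := PySem.Chars.neg_one_le_find s ['*']; omega
  obtain ⟨hpref, hmin⟩ := PySem.Chars.find_spec h0
  refine ⟨(PySem.Chars.find s ['*']).toNat, by omega, ?_, ?_, ?_, ?_⟩
  · have := PySem.List.slice_natCast s 0 (PySem.Chars.find s ['*']).toNat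
    simpa [Int.toNat_of_nonneg h0] using this
  · have := PySem.List.slice_from s (a := PySem.Chars.find s ['*'] + 1) (by omega)
    rw [this]
    congr 1
    omega
  · obtain ⟨t, ht⟩ := hpref
    have hdrop : s.drop (PySem.Chars.find s ['*']).toNat = '*' :: t := by simpa using ht.symm
    have ht' : s.drop ((PySem.Chars.find s ['*']).toNat + 1) = t := by
      rw [← List.drop_drop]
      · simp [hdrop]
    rw [ht']
    conv_lhs => rw [← List.take_append_drop (PySem.Chars.find s ['*']).toNat s, hdrop]
  · intro hmem
    obtain ⟨i, hi, hEq⟩ := List.getElem_of_mem hmem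
    have hilen : i < s.length := by
      have := hi; simp [List.length_take] at this; omega
    have hin : i < (PySem.Chars.find s ['*']).toNat := by
      have := hi; simp [List.length_take] at this; omega
    have : ['*'] <+: s.drop i := by
      have hd : s.drop i = s[i] :: s.drop (i + 1) := List.drop_eq_getElem_cons hilen
      have hv : s[i] = '*' := by
        have := hEq; rwa [List.getElem_take] at this
      exact ⟨s.drop (i + 1), by simp [hd, hv]⟩
    exact hmin i hin this

theorem star_count_lt (pre mid suf : List Char) (hpre : '*' ∉ pre) (hmid : '*' ∉ mid) :
    (pre ++ mid ++ suf).count '*' < (pre ++ '*' :: suf).count '*' := by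
  simp [List.count_append, List.count_eq_zero.mpr hpre, List.count_eq_zero.mpr hmid]

def raceCore (s : List Char) : List (List Char) :=
  let idx := PySem.Chars.find s ['*']
  if h : ¬ idx = -1 then
    let pre := PySem.List.slice s (some 0) (some idx)
    let suf := PySem.List.slice s (some (idx + 1)) none
    let r1 := PySem.Set.union PySem.Set.empty (raceCore (pre ++ suf))
    let r2 := PySem.Set.union r1 (raceCore (pre ++ ['('] ++ suf))
    PySem.Set.union r2 (raceCore (pre ++ [')'] ++ suf))
  else
    PySem.Set.add PySem.Set.empty s
termination_by s.count '*'
decreasing_by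
  all_goals
    obtain ⟨n, _hf, hs1, hs2, hsplit, hpre⟩ := find_star_decomp s h
    rw [hs1, hs2]
    conv_rhs => rw [hsplit]
  · simpa using star_count_lt (s.take n) [] (s.drop (n + 1)) hpre (by simp)
  · simpa [List.append_assoc] using
      star_count_lt (s.take n) ['('] (s.drop (n + 1)) hpre (by simp)
  · simpa [List.append_assoc] using
      star_count_lt (s.take n) [')'] (s.drop (n + 1)) hpre (by simp)

def replaceAsterisk (source : String) : List String :=
  (raceCore source.toList).map String.ofList

-- ===== PORT B =====
-- one step of B's loop body: at an asterisk, 'outs = [p + seg + c for p in outs for c in ("","(",")")]'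
-- with the buffered segment flushed; otherwise 'buf.append(ch)'.  The state is (outs, buf); ''.join of a
-- char buffer is the buffer itself at the List Char level.
def altStepP (st : List (List Char) × List Char) (ch : Char) : List (List Char) × List Char :=
  if ch == '*' then
    (st.1.flatMap (fun p => [[], ['('], [')']].map (fun c => p ++ st.2 ++ c)), [])
  else
    (st.1, st.2 ++ [ch])

def replaceAsterisk_alt (source : String) : List String :=
  let st := source.toList.foldl altStepP ([[]], [])
  let tail := st.2
  (PySem.Set.ofList (st.1.map (fun p => p ++ tail))).map String.ofList

-- ===== PRECONDITION & SPEC =====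
def Spec_replaceAsterisk (source : String) (out : List String) : Prop := out = replaceAsterisk_alt source
instance (source : String) (out : List String) : Decidable (Spec_replaceAsterisk source out) := by unfold Spec_replaceAsterisk; infer_instance

-- ===== CLAIM (what is proved, stated in full; the proofs are below) =====
def Claim_equal_replaceAsterisk : Prop := ∀ (source : String), Dom_replaceAsterisk source → Spec_replaceAsterisk source (replaceAsterisk source)

-- ===== LEMMAS AND PROOFS =====

-- proof-side one-character step: what B does to the flattened (buffer already appended) partial results
def altStep (outs : List (List Char)) (ch : Char) : List (List Char) :=
  if ch == '*' then
    outs.flatMap (fun p => [[], ['('], [')']].map (fun c => p ++ c))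
  else
    outs.map (fun p => p ++ [ch])

-- B's loop over a star-free segment just appends the segment to every partial result
theorem foldl_no_star (s : List Char) (hs : '*' ∉ s) (outs : List (List Char)) :
    List.foldl altStep outs s = outs.map (· ++ s) := by
  induction s generalizing outs with
  | nil => simp
  | cons c s ih =>
    have h1 : ¬ c = '*' := by intro hcc; exact hs (by simp [hcc])
    have hs' : '*' ∉ s := fun hm => hs (List.mem_cons_of_mem _ hm)
    have hstep : altStep outs c = outs.map (fun p => p ++ [c]) := by
      simp [altStep, h1]
    rw [List.foldl_cons, hstep, ih hs']
    simp [List.map_map, Function.comp_def]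

-- B's loop acts independently on each partial result
theorem foldl_altStep_append (s : List Char) (xs ys : List (List Char)) :
    List.foldl altStep (xs ++ ys) s = List.foldl altStep xs s ++ List.foldl altStep ys s := by
  induction s generalizing xs ys with
  | nil => rfl
  | cons c s ih =>
    have hstep : altStep (xs ++ ys) c = altStep xs c ++ altStep ys c := by
      unfold altStep; split_ifs <;> simp
    simp only [List.foldl_cons, hstep, ih]

theorem update_add_comm {α : Type} [BEq α] [LawfulBEq α] (s acc : PySem.Set α) (a : α) :
    PySem.Set.update s (PySem.Set.add acc a) = PySem.Set.add (PySem.Set.update s acc) a := by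
  by_cases h : acc.contains a
  · have ha : a ∈ acc := (PySem.Set.contains_iff acc a).mp h
    have ha' : (PySem.Set.update s acc).contains a := by
      rw [PySem.Set.contains_iff]
      exact (PySem.Set.mem_update s acc a).mpr (Or.inr ha)
    have hmem : a ∈ PySem.Set.update s acc := (PySem.Set.mem_update s acc a).mpr (Or.inr ha)
    have h1 : PySem.Set.add acc a = acc := by simp [PySem.Set.add, ha]
    have h2 : PySem.Set.add (PySem.Set.update s acc) a = PySem.Set.update s acc := by
      simp [PySem.Set.add, hmem]
    rw [h1, h2]
  · have hna : a ∉ acc := fun hm => h ((PySem.Set.contains_iff acc a).mpr hm)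
    have h1 : PySem.Set.add acc a = acc ++ [a] := by simp [PySem.Set.add, hna]
    rw [h1]
    simp [PySem.Set.update, List.foldl_append, PySem.Set.add]

theorem update_foldl_add {α : Type} [BEq α] [LawfulBEq α] (l : List α) (s acc : PySem.Set α) :
    PySem.Set.update s (List.foldl PySem.Set.add acc l) =
      PySem.Set.update (PySem.Set.update s acc) l := by
  induction l generalizing acc with
  | nil => rfl
  | cons a l ih =>
    simp only [List.foldl_cons]
    rw [ih, update_add_comm]
    rfl

theorem update_ofList {α : Type} [BEq α] [LawfulBEq α] (s : PySem.Set α) (l : List α) :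
    PySem.Set.update s (PySem.Set.ofList l) = PySem.Set.update s l := by
  rw [PySem.Set.ofList_eq_foldl, update_foldl_add]
  rfl

theorem ofList_append {α : Type} [BEq α] [LawfulBEq α] (l1 l2 : List α) :
    PySem.Set.ofList (l1 ++ l2) = PySem.Set.update (PySem.Set.ofList l1) l2 := by
  rw [PySem.Set.ofList_eq_foldl, PySem.Set.ofList_eq_foldl, List.foldl_append]
  rfl

theorem singleton_infix_of_mem {a : Char} {s : List Char} (h : a ∈ s) : [a] <:+: s := by
  obtain ⟨l, r, rfl⟩ := List.mem_iff_append.mp h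
  exact ⟨l, r, by simp⟩

-- the core equivalence: A's recursion computes the dedup of B's enumeration
theorem raceCore_eq_enum (s : List Char) :
    raceCore s = PySem.Set.ofList (List.foldl altStep [[]] s) := by
  generalize hk : s.count '*' = k
  induction k using Nat.strong_induction_on generalizing s with
  | _ k ih =>
    rw [raceCore]
    by_cases h : ¬ PySem.Chars.find s ['*'] = -1
    · simp only [dif_pos h]
      obtain ⟨n, _hf, hs1, hs2, hsplit, hpre⟩ := find_star_decomp s h
      rw [hs1, hs2]
      set pre := s.take n with hpredef
      set suf := s.drop (n + 1) with hsufdef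
      have hcnt : s.count '*' = suf.count '*' + 1 := by
        conv_lhs => rw [hsplit]
        simp [List.count_append, List.count_eq_zero.mpr hpre]
      have hlt : suf.count '*' < k := by omega
      have c1 : (pre ++ suf).count '*' = suf.count '*' := by
        simp [List.count_append, List.count_eq_zero.mpr hpre]
      have c2 : (pre ++ ['('] ++ suf).count '*' = suf.count '*' := by
        simp [List.count_append, List.count_eq_zero.mpr hpre]
      have c3 : (pre ++ [')'] ++ suf).count '*' = suf.count '*' := by
        simp [List.count_append, List.count_eq_zero.mpr hpre]
      rw [ih _ hlt _ c1, ih _ hlt _ c2, ih _ hlt _ c3]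
      -- rewrite the three enumerations as folds over `suf` from singleton starts
      have e1 : List.foldl altStep [[]] (pre ++ suf) = List.foldl altStep [pre] suf := by
        rw [List.foldl_append, foldl_no_star pre hpre]
        simp
      have e2 : List.foldl altStep [[]] (pre ++ ['('] ++ suf) = List.foldl altStep [pre ++ ['(']] suf := by
        rw [List.foldl_append, foldl_no_star (pre ++ ['(']) (by simp [hpre]) ]
        simp
      have e3 : List.foldl altStep [[]] (pre ++ [')'] ++ suf) = List.foldl altStep [pre ++ [')']] suf := by
        rw [List.foldl_append, foldl_no_star (pre ++ [')']) (by simp [hpre]) ]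
        simp
      have estar : List.foldl altStep [[]] s =
          List.foldl altStep [pre] suf ++ (List.foldl altStep [pre ++ ['(']] suf ++ List.foldl altStep [pre ++ [')']] suf) := by
        conv_lhs => rw [hsplit]
        rw [List.foldl_append, foldl_no_star pre hpre]
        simp only [List.map, List.nil_append, List.foldl_cons]
        have hstep : altStep [pre] '*' = [pre] ++ ([pre ++ ['(']] ++ [pre ++ [')']]) := by
          simp [altStep]
        rw [hstep, foldl_altStep_append, foldl_altStep_append]
      rw [e1, e2, e3, estar]
      -- now the set algebra
      have hu0 : PySem.Set.union PySem.Set.empty (PySem.Set.ofList (List.foldl altStep [pre] suf)) =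
          PySem.Set.ofList (List.foldl altStep [pre] suf) := by
        show PySem.Set.update PySem.Set.empty (PySem.Set.ofList (List.foldl altStep [pre] suf)) = _
        rw [update_ofList]
        rfl
      rw [hu0]
      show PySem.Set.update
        (PySem.Set.update (PySem.Set.ofList (List.foldl altStep [pre] suf))
          (PySem.Set.ofList (List.foldl altStep [pre ++ ['(']] suf)))
        (PySem.Set.ofList (List.foldl altStep [pre ++ [')']] suf)) = _
      rw [update_ofList, update_ofList, ← ofList_append, ← ofList_append, List.append_assoc]
    · simp only [dif_neg h]
      rw [not_not] at h
      have hnm : '*' ∉ s := by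
        intro hmem
        have : PySem.Chars.find s ['*'] = -1 := h
        exact (PySem.Chars.find_eq_neg_one_iff s ['*']).mp this (singleton_infix_of_mem hmem)
      rw [foldl_no_star s hnm]
      simp [PySem.Set.add, PySem.Set.empty, PySem.Set.ofList]

-- B's buffered fold, flattened, is the character-by-character fold
theorem foldlP_eq (s : List Char) : ∀ (outs : List (List Char)) (buf : List Char),
    (List.foldl altStepP (outs, buf) s).1.map (fun p => p ++ (List.foldl altStepP (outs, buf) s).2)
      = List.foldl altStep (outs.map (fun p => p ++ buf)) s := by
  induction s with
  | nil =>
    intro outs buf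
    rfl
  | cons c s ih =>
    intro outs buf
    by_cases hc : c = '*'
    · subst hc
      rw [List.foldl_cons, List.foldl_cons]
      have h1 : altStepP (outs, buf) '*' =
          (outs.flatMap (fun p => [[], ['('], [')']].map (fun c => p ++ buf ++ c)), []) := by
        simp [altStepP]
      rw [h1, ih]
      congr 1
      simp [altStep, List.map_flatMap, List.flatMap_map, List.append_assoc]
    · rw [List.foldl_cons, List.foldl_cons]
      have h1 : altStepP (outs, buf) c = (outs, buf ++ [c]) := by simp [altStepP, hc]
      have h2 : altStep (outs.map (fun p => p ++ buf)) c = outs.map (fun p => p ++ (buf ++ [c])) := by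
        simp [altStep, hc, List.map_map, Function.comp_def, List.append_assoc]
      rw [h1, h2, ih]

-- ===== VERDICT (by name: the statement is the Claim_ definition above) =====
theorem replaceAsterisk_spec : Claim_equal_replaceAsterisk := by
  intro source _
  show replaceAsterisk source = replaceAsterisk_alt source
  unfold replaceAsterisk replaceAsterisk_alt
  rw [raceCore_eq_enum]
  show _ = (PySem.Set.ofList
      ((List.foldl altStepP ([[]], []) source.toList).1.map
        (fun p => p ++ (List.foldl altStepP ([[]], []) source.toList).2))).map String.ofList
  rw [foldlP_eq]
  simp
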